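-- pv_equiv track=rewrite | github.com/usajosefernan-cmd/elu | backend/services/block_injector.py | _get_instruction_for_level
-- ===== SOURCE A (Python) =====
-- from typing import Dict, List, Any
--
-- def _get_instruction_for_level(levels: Dict[int, str], value: int) -> str:
--     """Obtiene la instrucción más cercana al nivel dado."""
--     if value in levels:
--         return levels[value]
--
--     # Buscar el nivel más cercano inferior
--     available = sorted([l for l in levels.keys() if l <= value], reverse=True)
--     if available:
--         return levels[available[0]]
--
--     # Si no hay inferior, buscar superior
--     available = sorted([l for l in levels.keys() if l > value])
--     if available:
--         return levels[available[0]]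
--
--     return ''
-- ===== SOURCE B (Python) =====
-- def _get_instruction_for_level(levels, value):
--     """Single pass: track the largest key <= value and the smallest key > value."""
--     best_lower = None   # (key, instruction) with the largest key <= value seen so far
--     best_higher = None  # (key, instruction) with the smallest key > value seen so far
--     for k, instr in levels.items():
--         if k <= value:
--             if best_lower is None or best_lower[0] < k:
--                 best_lower = (k, instr)
--         else:
--             if best_higher is None or k < best_higher[0]:
--                 best_higher = (k, instr)
--     if best_lower is not None:
--         return best_lower[1]
--     if best_higher is not None:
--         return best_higher[1]
--     return ''
-- ===== Notes on version B (the rewrite author's own statement) =====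
-- stated objective: alternative
-- what changed: Replaces the membership test plus two filter-then-sort passes with one traversal of levels.items() that maintains the best lower candidate (largest key <= value) and the best higher candidate (smallest key > value) as running extrema; O(n) single pass vs O(n log n) sort, though CPython's C-level sort makes wall-clock times comparable.
import Mathlib
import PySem

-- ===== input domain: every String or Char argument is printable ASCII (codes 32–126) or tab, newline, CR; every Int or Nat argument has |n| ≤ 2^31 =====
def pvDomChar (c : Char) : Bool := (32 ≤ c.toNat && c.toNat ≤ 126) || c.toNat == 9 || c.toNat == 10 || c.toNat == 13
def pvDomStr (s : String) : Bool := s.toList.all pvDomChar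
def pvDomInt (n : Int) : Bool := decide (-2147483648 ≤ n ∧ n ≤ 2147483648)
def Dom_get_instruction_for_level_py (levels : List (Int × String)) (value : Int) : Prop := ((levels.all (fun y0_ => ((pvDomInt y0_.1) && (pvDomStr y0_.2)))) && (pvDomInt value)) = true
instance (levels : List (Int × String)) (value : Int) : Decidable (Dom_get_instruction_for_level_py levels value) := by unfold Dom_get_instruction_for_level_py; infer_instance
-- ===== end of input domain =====

-- B replaces A's membership test plus two filter-then-sort passes by one pass tracking the
-- running max-lower / min-higher candidate (objective: alternative single-pass algorithm).

-- ===== PORT A =====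
-- dict indexing levels[k]: first entry with key k (guaranteed present at every call site of A)
def pvLookupD (levels : List (Int × String)) (k : Int) : String :=
  ((levels.find? (fun e => e.1 == k)).map Prod.snd).getD ""

def get_instruction_for_level_py (levels : List (Int × String)) (value : Int) : String :=
  let keys := levels.map Prod.fst
  if keys.contains value then pvLookupD levels value
  else
    match PySem.List.sorted (keys.filter (fun l => decide (l ≤ value))) (fun x => x) true with
    | m :: _ => pvLookupD levels m
    | [] =>
      match PySem.List.sorted (keys.filter (fun l => decide (value < l))) (fun x => x) false with
      | m :: _ => pvLookupD levels m
      | [] => ""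

-- ===== PORT B =====
def pvStep (value : Int) (acc : Option (Int × String) × Option (Int × String))
    (e : Int × String) : Option (Int × String) × Option (Int × String) :=
  if e.1 ≤ value then
    (match acc.1 with
     | none => some e
     | some b => if b.1 < e.1 then some e else some b, acc.2)
  else
    (acc.1,
     match acc.2 with
     | none => some e
     | some b => if e.1 < b.1 then some e else some b)

def get_instruction_for_level_py_alt (levels : List (Int × String)) (value : Int) : String :=
  match levels.foldl (pvStep value) (none, none) with
  | (some b, _) => b.2
  | (none, some b) => b.2
  | (none, none) => ""

-- ===== PRECONDITION & SPEC =====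
def Spec_get_instruction_for_level_py (levels : List (Int × String)) (value : Int) (out : String) : Prop := out = get_instruction_for_level_py_alt levels value
instance (levels : List (Int × String)) (value : Int) (out : String) : Decidable (Spec_get_instruction_for_level_py levels value out) := by unfold Spec_get_instruction_for_level_py; infer_instance

-- ===== CLAIM (what is proved, stated in full; the proofs are below) =====
def Claim_equal_get_instruction_for_level_py : Prop := ∀ (levels : List (Int × String)) (value : Int), Dom_get_instruction_for_level_py levels value → Spec_get_instruction_for_level_py levels value (get_instruction_for_level_py levels value)

-- ===== LEMMAS AND PROOFS =====

-- the two accumulator updates of pvStep, isolated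
def pvUpdMax (b : Option (Int × String)) (e : Int × String) : Option (Int × String) :=
  match b with
  | none => some e
  | some p => if p.1 < e.1 then some e else some p

def pvUpdMin (b : Option (Int × String)) (e : Int × String) : Option (Int × String) :=
  match b with
  | none => some e
  | some p => if e.1 < p.1 then some e else some p

-- closed-form left-to-right maximum / minimum with earlier-wins tie-breaking
def pvPickMax : List (Int × String) → Option (Int × String)
  | [] => none
  | e :: t =>
    match pvPickMax t with
    | none => some e
    | some q => if e.1 < q.1 then some q else some e

def pvPickMin : List (Int × String) → Option (Int × String)
  | [] => none
  | e :: t =>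
    match pvPickMin t with
    | none => some e
    | some q => if q.1 < e.1 then some q else some e

lemma foldl_pvStep_split (value : Int) :
    ∀ (L : List (Int × String)) (acc : Option (Int × String) × Option (Int × String)),
      L.foldl (pvStep value) acc =
        ((L.filter (fun e => decide (e.1 ≤ value))).foldl pvUpdMax acc.1,
         (L.filter (fun e => !decide (e.1 ≤ value))).foldl pvUpdMin acc.2) := by
  intro L
  induction L with
  | nil => intro acc; rfl
  | cons e t ih =>
    intro acc
    by_cases h : e.1 ≤ value
    · simp [List.foldl_cons, ih, pvStep, pvUpdMax, h]
    · simp [List.foldl_cons, ih, pvStep, pvUpdMin, h]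

lemma foldl_updMax_eq_pick : ∀ (L : List (Int × String)) (acc : Option (Int × String)),
    L.foldl pvUpdMax acc =
      match acc with
      | none => pvPickMax L
      | some p => match pvPickMax L with
                  | none => some p
                  | some q => if p.1 < q.1 then some q else some p := by
  intro L
  induction L with
  | nil => intro acc; cases acc <;> rfl
  | cons e t ih =>
    intro acc
    cases acc with
    | none =>
      simp only [List.foldl_cons]
      rw [show pvUpdMax none e = some e from rfl, ih]
      simp only [pvPickMax]
    | some p =>
      simp only [List.foldl_cons]
      rw [show pvUpdMax (some p) e = if p.1 < e.1 then some e else some p from rfl]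
      by_cases h1 : p.1 < e.1
      · rw [if_pos h1, ih]
        simp only [pvPickMax]
        cases h : pvPickMax t with
        | none => simp [h1]
        | some q =>
          by_cases h2 : e.1 < q.1
          · have h3 : p.1 < q.1 := by omega
            simp [h2, h3]
          · simp [h2, h1]
      · rw [if_neg h1, ih]
        simp only [pvPickMax]
        cases h : pvPickMax t with
        | none => simp [h1]
        | some q =>
          by_cases h2 : e.1 < q.1
          · simp [h2]
          · have h3 : ¬ p.1 < q.1 := by omega
            simp [h2, h1, h3]

lemma foldl_updMin_eq_pick : ∀ (L : List (Int × String)) (acc : Option (Int × String)),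
    L.foldl pvUpdMin acc =
      match acc with
      | none => pvPickMin L
      | some p => match pvPickMin L with
                  | none => some p
                  | some q => if q.1 < p.1 then some q else some p := by
  intro L
  induction L with
  | nil => intro acc; cases acc <;> rfl
  | cons e t ih =>
    intro acc
    cases acc with
    | none =>
      simp only [List.foldl_cons]
      rw [show pvUpdMin none e = some e from rfl, ih]
      simp only [pvPickMin]
    | some p =>
      simp only [List.foldl_cons]
      rw [show pvUpdMin (some p) e = if e.1 < p.1 then some e else some p from rfl]
      by_cases h1 : e.1 < p.1
      · rw [if_pos h1, ih]
        simp only [pvPickMin]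
        cases h : pvPickMin t with
        | none => simp [h1]
        | some q =>
          by_cases h2 : q.1 < e.1
          · have h3 : q.1 < p.1 := by omega
            simp [h2, h3]
          · simp [h2, h1]
      · rw [if_neg h1, ih]
        simp only [pvPickMin]
        cases h : pvPickMin t with
        | none => simp [h1]
        | some q =>
          by_cases h2 : q.1 < e.1
          · simp [h2]
          · have h3 : ¬ q.1 < p.1 := by omega
            simp [h2, h1, h3]

lemma pvPickMax_eq_none_iff (L : List (Int × String)) : pvPickMax L = none ↔ L = [] := by
  cases L with
  | nil => simp [pvPickMax]
  | cons e t =>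
    simp only [pvPickMax]
    cases pvPickMax t with
    | none => simp
    | some q => by_cases h : e.1 < q.1 <;> simp [h]

lemma pvPickMin_eq_none_iff (L : List (Int × String)) : pvPickMin L = none ↔ L = [] := by
  cases L with
  | nil => simp [pvPickMin]
  | cons e t =>
    simp only [pvPickMin]
    cases pvPickMin t with
    | none => simp
    | some q => by_cases h : q.1 < e.1 <;> simp [h]

lemma pvPickMax_spec : ∀ (L : List (Int × String)) (q : Int × String),
    pvPickMax L = some q →
      L.find? (fun e => e.1 == q.1) = some q ∧ ∀ e ∈ L, e.1 ≤ q.1 := by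
  intro L
  induction L with
  | nil => intro q h; simp [pvPickMax] at h
  | cons e t ih =>
    intro q h
    simp only [pvPickMax] at h
    cases ht : pvPickMax t with
    | none =>
      simp only [ht] at h
      have : q = e := by cases h; rfl
      subst this
      have ht' := (pvPickMax_eq_none_iff t).mp ht
      subst ht'
      simp [List.find?_cons]
    | some q' =>
      simp only [ht] at h
      obtain ⟨hf, hb⟩ := ih q' ht
      by_cases hlt : e.1 < q'.1
      · rw [if_pos hlt] at h
        cases h
        constructor
        · rw [List.find?_cons]
          have : (e.1 == q.1) = false := by simp; omega
          rw [this]; exact hf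
        · intro x hx
          rcases List.mem_cons.mp hx with rfl | hx
          · omega
          · exact hb x hx
      · rw [if_neg hlt] at h
        cases h
        constructor
        · rw [List.find?_cons]
          simp
        · intro x hx
          rcases List.mem_cons.mp hx with rfl | hx
          · omega
          · have := hb x hx; omega

lemma pvPickMin_spec : ∀ (L : List (Int × String)) (q : Int × String),
    pvPickMin L = some q →
      L.find? (fun e => e.1 == q.1) = some q ∧ ∀ e ∈ L, q.1 ≤ e.1 := by
  intro L
  induction L with
  | nil => intro q h; simp [pvPickMin] at h
  | cons e t ih =>
    intro q h
    simp only [pvPickMin] at h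
    cases ht : pvPickMin t with
    | none =>
      simp only [ht] at h
      have : q = e := by cases h; rfl
      subst this
      have ht' := (pvPickMin_eq_none_iff t).mp ht
      subst ht'
      simp [List.find?_cons]
    | some q' =>
      simp only [ht] at h
      obtain ⟨hf, hb⟩ := ih q' ht
      by_cases hlt : q'.1 < e.1
      · rw [if_pos hlt] at h
        cases h
        constructor
        · rw [List.find?_cons]
          have : (e.1 == q.1) = false := by simp; omega
          rw [this]; exact hf
        · intro x hx
          rcases List.mem_cons.mp hx with rfl | hx
          · omega
          · exact hb x hx
      · rw [if_neg hlt] at h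
        cases h
        constructor
        · rw [List.find?_cons]
          simp
        · intro x hx
          rcases List.mem_cons.mp hx with rfl | hx
          · omega
          · have := hb x hx; omega

-- find? for a key k over a filtered list equals find? over the whole list, when every
-- entry with key k passes the filter
lemma find?_filter_key (k : Int) (p : Int × String → Bool)
    (hp : ∀ e : Int × String, e.1 = k → p e = true) :
    ∀ L : List (Int × String),
      (L.filter p).find? (fun e => e.1 == k) = L.find? (fun e => e.1 == k) := by
  intro L
  induction L with
  | nil => simp
  | cons e t ih =>
    by_cases hk : e.1 = k
    · have hpe := hp e hk
      simp [List.filter_cons, hpe, List.find?_cons, hk]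
    · by_cases hpe : p e = true
      · simp [List.filter_cons, hpe, List.find?_cons, hk, ih]
      · simp only [Bool.not_eq_true] at hpe
        simp [List.filter_cons, hpe, List.find?_cons, hk, ih]

-- keys of the filtered list = filtered keys
lemma map_fst_filter_le (L : List (Int × String)) (value : Int) :
    (L.filter (fun e => decide (e.1 ≤ value))).map Prod.fst
      = (L.map Prod.fst).filter (fun l => decide (l ≤ value)) := by
  induction L with
  | nil => rfl
  | cons e t ih =>
    by_cases h : e.1 ≤ value <;> simp [h, ih]

lemma map_fst_filter_gt (L : List (Int × String)) (value : Int) :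
    (L.filter (fun e => !decide (e.1 ≤ value))).map Prod.fst
      = (L.map Prod.fst).filter (fun l => decide (value < l)) := by
  induction L with
  | nil => rfl
  | cons e t ih =>
    by_cases h : e.1 ≤ value
    · have h' : ¬ value < e.1 := by omega
      simp [h, h', ih]
    · have h' : value < e.1 := by omega
      simp [h, h', ih]

-- main equivalence (holds for every assoc list)
lemma main_equiv (levels : List (Int × String)) (value : Int) :
    get_instruction_for_level_py levels value = get_instruction_for_level_py_alt levels value := by
  unfold get_instruction_for_level_py get_instruction_for_level_py_alt
  rw [foldl_pvStep_split, foldl_updMax_eq_pick, foldl_updMin_eq_pick]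
  set lows := levels.filter (fun e => decide (e.1 ≤ value)) with hlows
  set highs := levels.filter (fun e => !decide (e.1 ≤ value)) with hhighs
  cases hmax : pvPickMax lows with
  | none =>
    -- no lower key: lows = [], so the sorted lower list is empty and value ∉ keys
    have hln : lows = [] := (pvPickMax_eq_none_iff lows).mp hmax
    have hkeys : (levels.map Prod.fst).filter (fun l => decide (l ≤ value)) = [] := by
      rw [← map_fst_filter_le, ← hlows, hln]; rfl
    have hnc : (levels.map Prod.fst).contains value = false := by
      by_contra hc
      simp only [Bool.not_eq_false, List.contains_eq_mem, decide_eq_true_eq] at hc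
      have : value ∈ (levels.map Prod.fst).filter (fun l => decide (l ≤ value)) := by
        simp [List.mem_filter, hc]
      rw [hkeys] at this
      exact absurd this (List.not_mem_nil)
    simp only [hnc, Bool.false_eq_true, if_false, hkeys]
    have hs1 : PySem.List.sorted ([] : List Int) (fun x => x) true = [] := by
      rw [PySem.List.sorted_eq_nil_iff]
    rw [hs1]
    cases hmin : pvPickMin highs with
    | none =>
      have hhn : highs = [] := (pvPickMin_eq_none_iff highs).mp hmin
      have hkeys2 : (levels.map Prod.fst).filter (fun l => decide (value < l)) = [] := by
        rw [← map_fst_filter_gt, ← hhighs, hhn]; rfl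
      rw [hkeys2]
      have hs2 : PySem.List.sorted ([] : List Int) (fun x => x) false = [] := by
        rw [PySem.List.sorted_eq_nil_iff]
      rw [hs2]
    | some q =>
      obtain ⟨hf, hb⟩ := pvPickMin_spec highs q hmin
      have hkeys2 : (levels.map Prod.fst).filter (fun l => decide (value < l))
          = highs.map Prod.fst := by rw [← map_fst_filter_gt, ← hhighs]
      rw [hkeys2]
      have hhne : highs ≠ [] := by
        intro hc; rw [hc] at hmin; simp [pvPickMin] at hmin
      cases hsort : PySem.List.sorted (highs.map Prod.fst) (fun x => x) false with
      | nil =>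
        exfalso
        rw [PySem.List.sorted_eq_nil_iff] at hsort
        exact hhne (List.map_eq_nil_iff.mp hsort)
      | cons m t =>
        -- m is the min key of highs; so m = q.1
        have hmmem : m ∈ highs.map Prod.fst := by
          rw [← PySem.List.mem_sorted (highs.map Prod.fst) (fun x => x) false, hsort]
          exact List.mem_cons_self
      
        have hmle : ∀ y ∈ highs.map Prod.fst, m ≤ y :=
          PySem.List.key_head_sorted_le (highs.map Prod.fst) (fun x => x) hsort
        obtain ⟨e, he, hek⟩ := List.mem_map.mp hmmem
        have h1 : q.1 ≤ m := hek ▸ hb e he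
        have h2 : m ≤ q.1 := by
          apply hmle
          have hq : q ∈ highs := List.mem_of_find?_eq_some hf
          exact List.mem_map_of_mem hq
        have hmq : m = q.1 := le_antisymm h2 h1
        -- A's lookup = find? over levels = find? over highs = some q
        have hfl : levels.find? (fun e => e.1 == m) = some q := by
          rw [← find?_filter_key m (fun e => !decide (e.1 ≤ value))
              (by intro e hke; have : ¬ e.1 ≤ value := by
                    have : value < m := by
                      have := List.mem_filter.mp (by rw [hhighs] at he; exact he) |>.2
                      simp at this; omega
                    omega
                  simp [hke]; omega) levels]
          rw [← hhighs, hmq]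
          exact hf
        show pvLookupD levels m = q.2
        unfold pvLookupD
        rw [hfl]
        rfl
  | some q =>
    obtain ⟨hf, hb⟩ := pvPickMax_spec lows q hmax
    have hq : q ∈ lows := List.mem_of_find?_eq_some hf
    have hqle : q.1 ≤ value := by
      have := (List.mem_filter.mp (by rw [hlows] at hq; exact hq)).2
      simpa using this
    -- B returns q.2; show A's branch (whichever fires) looks up key q.1 and finds q
    have hlookup : pvLookupD levels q.1 = q.2 := by
      unfold pvLookupD
      have hfl : levels.find? (fun e => e.1 == q.1) = some q := by
        rw [← find?_filter_key q.1 (fun e => decide (e.1 ≤ value))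
            (by intro e hke; simp [hke]; omega) levels]
        rw [← hlows]; exact hf
      rw [hfl]
      rfl
    by_cases hc : (levels.map Prod.fst).contains value
    · -- value is itself a key; then the max lower key is value
      simp only [hc, if_true]
      show pvLookupD levels value = q.2
      have hvmem : value ∈ levels.map Prod.fst := by
        simpa [List.contains_eq_mem] using hc
      obtain ⟨e, he, hek⟩ := List.mem_map.mp hvmem
      have helow : e ∈ lows := by
        rw [hlows]; exact List.mem_filter.mpr ⟨he, by simp [hek]⟩
      have : value ≤ q.1 := hek ▸ hb e helow
      have hqv : q.1 = value := by omega
      rw [← hqv]; exact hlookup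
    · simp only [hc, Bool.false_eq_true, if_false]
      have hkeys : (levels.map Prod.fst).filter (fun l => decide (l ≤ value))
          = lows.map Prod.fst := by rw [← map_fst_filter_le, ← hlows]
      rw [hkeys]
      cases hsort : PySem.List.sorted (lows.map Prod.fst) (fun x => x) true with
      | nil =>
        exfalso
        rw [PySem.List.sorted_eq_nil_iff] at hsort
        have : lows = [] := List.map_eq_nil_iff.mp hsort
        rw [this] at hq
        exact absurd hq (List.not_mem_nil)
      | cons m t =>
        have hmmem : m ∈ lows.map Prod.fst := by
          rw [← PySem.List.mem_sorted (lows.map Prod.fst) (fun x => x) true, hsort]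
          exact List.mem_cons_self
        have hmge : ∀ y ∈ lows.map Prod.fst, y ≤ m :=
          PySem.List.key_head_sorted_rev_ge (lows.map Prod.fst) (fun x => x) hsort
        obtain ⟨e, he, hek⟩ := List.mem_map.mp hmmem
        have h1 : m ≤ q.1 := hek ▸ hb e he
        have h2 : q.1 ≤ m := hmge q.1 (List.mem_map_of_mem hq)
        have hmq : m = q.1 := le_antisymm h1 h2
        show pvLookupD levels m = q.2
        rw [hmq]; exact hlookup

-- ===== VERDICT (by name: the statement is the Claim_ definition above) =====
theorem get_instruction_for_level_py_spec : Claim_equal_get_instruction_for_level_py := by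
  intro levels value _hdom
  unfold Spec_get_instruction_for_level_py
  exact main_equiv levels value
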